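-- pv_equiv track=rewrite | github.com/homer1013/BasaltOS | tools/configure.py | slug_to_macro
-- ===== SOURCE A (Python) =====
-- from typing import Dict, List, Set, Optional, Tuple, Any
--
-- def slug_to_macro(name: str) -> str:
--     out: List[str] = []
--     for ch in name:
--         if ch.isalnum():
--             out.append(ch.upper())
--         else:
--             out.append("_")
--     macro = "".join(out)
--     while "__" in macro:
--         macro = macro.replace("__", "_")
--     return macro.strip("_")
-- ===== SOURCE B (Python) =====
-- def slug_to_macro(name: str) -> str:
--     words = []
--     cur = []
--     for ch in name:
--         if ch.isalnum():
--             cur.append(ch.upper())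
--         elif cur:
--             words.append("".join(cur))
--             cur = []
--     if cur:
--         words.append("".join(cur))
--     return "_".join(words)
-- ===== Notes on version B (the rewrite author's own statement) =====
-- stated objective: simpler
-- what changed: Single pass that tokenizes the name into runs of alphanumeric characters and joins them with '_', replacing A's map-to-underscores pass followed by a repeated replace('__','_') collapse loop and a final strip('_').
import Mathlib
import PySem

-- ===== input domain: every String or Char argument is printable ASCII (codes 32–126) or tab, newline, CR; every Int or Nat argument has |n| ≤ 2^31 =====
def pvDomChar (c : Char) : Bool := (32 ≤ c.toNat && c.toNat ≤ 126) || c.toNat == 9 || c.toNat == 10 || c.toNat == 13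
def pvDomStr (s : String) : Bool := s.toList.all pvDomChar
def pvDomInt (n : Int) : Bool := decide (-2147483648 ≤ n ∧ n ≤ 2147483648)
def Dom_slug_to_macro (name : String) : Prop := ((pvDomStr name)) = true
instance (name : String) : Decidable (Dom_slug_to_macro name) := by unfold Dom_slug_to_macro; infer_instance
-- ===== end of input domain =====

-- B tokenizes the name into alnum runs and joins them with '_', replacing A's
-- map-then-collapse-then-strip pipeline; objective: simpler single pass.


-- ===== PORT A =====
-- A-side helpers: the while-loop needs a termination argument, so we
-- characterise one pass of replace("__","_") as pvR2 and show it shrinks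
-- the string whenever "__" occurs in it.
def pvR2 : List Char → List Char
  | [] => []
  | [c] => [c]
  | c :: d :: t => if c = '_' ∧ d = '_' then '_' :: pvR2 t else c :: pvR2 (d :: t)

theorem pvGo_eq : ∀ (fuel : Nat) (l acc : List Char), l.length ≤ fuel →
    PySem.Chars.replace.go ['_', '_'] ['_'] fuel l acc = acc.reverse ++ pvR2 l := by
  intro fuel
  induction fuel with
  | zero =>
    intro l acc h
    have : l = [] := by cases l <;> simp_all
    subst this
    rw [PySem.Chars.replace.go.eq_def]
    simp [pvR2]
  | succ n ih =>
    intro l acc h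
    match l with
    | [] =>
      rw [PySem.Chars.replace.go.eq_def]
      simp [pvR2]
    | [c] =>
      rw [PySem.Chars.replace.go.eq_def]
      have hp : (['_', '_'].isPrefixOf [c]) = false := by
        simp [List.isPrefixOf]
      simp only [hp, Bool.false_eq_true, if_false]
      rw [ih [] (c :: acc) (by simp)]
      simp [pvR2]
    | c :: d :: t =>
      rw [PySem.Chars.replace.go.eq_def]
      by_cases hc : c = '_' ∧ d = '_'
      · obtain ⟨hc1, hc2⟩ := hc
        subst hc1; subst hc2
        have hp : (['_', '_'].isPrefixOf ('_' :: '_' :: t)) = true := by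
          simp [List.isPrefixOf]
        simp only [hp, if_true, List.length_cons, List.length_nil, List.drop_succ_cons,
          List.drop_zero, List.reverse_singleton, List.singleton_append]
        rw [ih t ('_' :: acc) (by simp at h ⊢; omega)]
        simp [pvR2]
      · have hp : (['_', '_'].isPrefixOf (c :: d :: t)) = false := by
          rcases not_and_or.mp hc with h1 | h1 <;> simp [List.isPrefixOf, h1] <;> tauto
        simp only [hp, Bool.false_eq_true, if_false]
        rw [ih (d :: t) (c :: acc) (by simp at h ⊢; omega)]
        simp [pvR2, hc]

theorem pvReplace_eq (m : List Char) :
    PySem.Chars.replace m ['_', '_'] ['_'] = pvR2 m := by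
  rw [PySem.Chars.replace]
  simp only [List.isEmpty_cons, Bool.false_eq_true, if_false]
  rw [pvGo_eq m.length m [] le_rfl]
  simp

theorem pvR2_le (m : List Char) : (pvR2 m).length ≤ m.length := by
  fun_induction pvR2 m with
  | case1 => simp [pvR2]
  | case2 c => simp [pvR2]
  | case3 c d t h ih => simp [pvR2, h]; omega
  | case4 c d t h ih => simp [pvR2, h]; simpa using ih

theorem pvR2_lt (m : List Char) (h : ['_', '_'] <:+: m) :
    (pvR2 m).length < m.length := by
  fun_induction pvR2 m with
  | case1 => simp at h
  | case2 c => have := h.length_le; simp at this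
  | case3 c d t hc ih =>
    obtain ⟨h1, h2⟩ := hc; subst h1; subst h2
    have := pvR2_le t
    simp [pvR2]
    omega
  | case4 c d t hc ih =>
    have h' : ['_', '_'] <:+: (d :: t) := by
      rcases List.infix_cons_iff.mp h with hp | hi
      · rcases List.cons_prefix_cons.mp hp with ⟨e1, hp2⟩
        rcases List.cons_prefix_cons.mp hp2 with ⟨e2, _⟩
        exact absurd ⟨e1.symm, e2.symm⟩ hc
      · exact hi
    have := ih h'
    simp [pvR2, hc]
    simpa using this

theorem pvReplace_lt (m : List Char)
    (h : PySem.Chars.isIn ['_', '_'] m = true) :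
    (PySem.Chars.replace m ['_', '_'] ['_']).length < m.length := by
  rw [pvReplace_eq]
  exact pvR2_lt m ((PySem.Chars.isIn_iff_infix _ _).mp h)

-- the 'while "__" in macro: macro = macro.replace("__", "_")' loop of A
def pvWhile (m : List Char) : List Char :=
  if h : PySem.Chars.isIn ['_', '_'] m = true then
    pvWhile (PySem.Chars.replace m ['_', '_'] ['_'])
  else m
termination_by m.length
decreasing_by exact pvReplace_lt m h

def slug_to_macro (name : String) : String :=
  -- for ch in name: out.append(ch.upper() if ch.isalnum() else "_")
  let out : List Char := name.toList.foldl
    (fun acc ch =>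
      acc ++ [if PySem.Chars.isalnum ch then PySem.Chars.upperChar ch else '_']) []
  -- macro = "".join(out)
  let m := PySem.Chars.join [] (out.map ([·]))
  -- while "__" in macro: …  then  macro.strip("_")
  String.ofList (PySem.Chars.stripChars (pvWhile m) ['_'])

-- ===== PORT B =====
-- one loop step: grow the current word on an alnum char, otherwise flush it
def pvStep (st : List (List Char) × List Char) (ch : Char) :
    List (List Char) × List Char :=
  if PySem.Chars.isalnum ch then (st.1, st.2 ++ [PySem.Chars.upperChar ch])
  else if st.2 ≠ [] then (st.1 ++ [st.2], [])
  else st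

def slug_to_macro_alt (name : String) : String :=
  let st := name.toList.foldl pvStep ([], [])
  let ws := if st.2 ≠ [] then st.1 ++ [st.2] else st.1
  String.ofList (PySem.Chars.join ['_'] ws)

-- ===== PRECONDITION & SPEC =====
def Spec_slug_to_macro (name : String) (out : String) : Prop := out = slug_to_macro_alt name
instance (name : String) (out : String) : Decidable (Spec_slug_to_macro name out) := by unfold Spec_slug_to_macro; infer_instance

-- ===== CLAIM (what is proved, stated in full; the proofs are below) =====
def Claim_equal_slug_to_macro : Prop := ∀ (name : String), Dom_slug_to_macro name → Spec_slug_to_macro name (slug_to_macro name)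

-- ===== LEMMAS AND PROOFS =====

-- squeeze machine: pvSq b collapses runs of '_' (b = an '_' was just emitted)
def pvSq (b : Bool) : List Char → List Char
  | [] => []
  | c :: t => if c = '_' then (if b then pvSq true t else '_' :: pvSq true t)
              else c :: pvSq false t

-- output machine of A after the collapse: a0 = at start / after a word char,
-- a1 = just after an emitted '_' (or at the very start for the lstrip view)
mutual
def pvA0 : List Char → List Char
  | [] => []
  | c :: t => if PySem.Chars.isalnum c then PySem.Chars.upperChar c :: pvA0 t
              else '_' :: pvA1 t
def pvA1 : List Char → List Char
  | [] => []
  | c :: t => if PySem.Chars.isalnum c then PySem.Chars.upperChar c :: pvA0 t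
              else pvA1 t
end

-- word machine of B: w0 = no word yet, w1 = inside a word, w2 = between words
mutual
def pvW0 : List Char → List Char
  | [] => []
  | c :: t => if PySem.Chars.isalnum c then PySem.Chars.upperChar c :: pvW1 t
              else pvW0 t
def pvW1 : List Char → List Char
  | [] => []
  | c :: t => if PySem.Chars.isalnum c then PySem.Chars.upperChar c :: pvW1 t
              else pvW2 t
def pvW2 : List Char → List Char
  | [] => []
  | c :: t => if PySem.Chars.isalnum c then '_' :: PySem.Chars.upperChar c :: pvW1 t
              else pvW2 t
end

theorem pvU_ne (c : Char) (h : PySem.Chars.isalnum c = true) :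
    PySem.Chars.upperChar c ≠ '_' := by
  intro heq
  simp only [PySem.Chars.upperChar] at heq
  by_cases hl : PySem.Chars.islower c = true
  · rw [if_pos hl] at heq
    rw [PySem.Chars.islower, Bool.and_eq_true, decide_eq_true_eq, decide_eq_true_eq] at hl
    obtain ⟨h1, h2⟩ := hl
    have n1 : 97 ≤ c.toNat := by
      have := UInt32.le_iff_toNat_le.mp (Char.le_def.mp h1); simpa using this
    have n2 : c.toNat ≤ 122 := by
      have := UInt32.le_iff_toNat_le.mp (Char.le_def.mp h2); simpa using this
    have hv : (c.toNat - 32).isValidChar := Or.inl (by omega)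
    have ht : (Char.ofNat (c.toNat - 32)).toNat = c.toNat - 32 := by
      rw [Char.ofNat, dif_pos hv]
      simp only [Char.ofNatAux, Char.toNat]
      first
        | rfl
        | simp [UInt32.toNat, BitVec.toNat_ofNatLT]
    rw [heq] at ht
    have h95 : ('_' : Char).toNat = 95 := rfl
    rw [h95] at ht
    omega
  · rw [if_neg hl] at heq
    subst heq
    exact absurd h (by decide)

theorem pvSq_r2 (m : List Char) : ∀ b, pvSq b (pvR2 m) = pvSq b m := by
  fun_induction pvR2 m with
  | case1 => intro b; rfl
  | case2 c => intro b; rfl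
  | case3 c d t hc ih =>
    obtain ⟨h1, h2⟩ := hc; subst h1; subst h2
    intro b
    simp [pvR2, pvSq, ih]
  | case4 c d t hc ih =>
    intro b
    by_cases h1 : c = '_' <;> simp [pvR2, hc, pvSq, h1, ih]

theorem pvSq_no_dd (m : List Char) (h : ¬ (['_', '_'] <:+: m)) :
    pvSq false m = m ∧ (m.head? ≠ some '_' → pvSq true m = m) := by
  induction m with
  | nil => simp [pvSq]
  | cons c t ih =>
    have ht : ¬ (['_', '_'] <:+: t) := fun hi => h (List.infix_cons_iff.mpr (Or.inr hi))
    obtain ⟨ih1, ih2⟩ := ih ht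
    by_cases hc : c = '_'
    · subst hc
      have hh : t.head? ≠ some '_' := by
        intro hd
        cases t with
        | nil => simp at hd
        | cons d t' =>
          simp at hd; subst hd
          exact h (List.infix_cons_iff.mpr (Or.inl (by simp)))
      constructor
      · simp [pvSq, ih2 hh]
      · intro hcontra; simp at hcontra
    · constructor
      · simp [pvSq, hc, ih1]
      · intro _; simp [pvSq, hc, ih1]

theorem pvWhile_eq_sq (m : List Char) : pvWhile m = pvSq false m := by
  fun_induction pvWhile m with
  | case1 m h ih =>
    rw [ih, pvReplace_eq, pvSq_r2]
  | case2 m h =>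
    exact ((pvSq_no_dd m (by
      intro hi
      exact h ((PySem.Chars.isIn_iff_infix _ _).mpr hi))).1).symm

theorem pvSq_map (s : List Char) :
    pvSq false (s.map (fun ch => if PySem.Chars.isalnum ch then PySem.Chars.upperChar ch else '_')) = pvA0 s ∧
    pvSq true (s.map (fun ch => if PySem.Chars.isalnum ch then PySem.Chars.upperChar ch else '_')) = pvA1 s := by
  induction s with
  | nil => simp [pvSq, pvA0, pvA1]
  | cons c t ih =>
    obtain ⟨ih0, ih1⟩ := ih
    by_cases hc : PySem.Chars.isalnum c = true
    · have hne : PySem.Chars.upperChar c ≠ '_' := pvU_ne c hc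
      simp [pvSq, pvA0, pvA1, hc, hne, ih0]
    · simp [pvSq, pvA0, pvA1, hc, ih1]

theorem pvP_neg (u : Char) (h : u ≠ '_') : ¬ ((['_'] : List Char).contains u = true) := by
  simp [h]

theorem pvP_pos : ((['_'] : List Char).contains '_') = true := by decide

-- lstrip('_') and rstrip('_') of the machines
theorem pvLstrip_a1 (s : List Char) :
    List.dropWhile (fun c => (['_'] : List Char).contains c) (pvA1 s) = pvA1 s := by
  induction s with
  | nil => simp [pvA1]
  | cons c t ih =>
    by_cases hc : PySem.Chars.isalnum c = true
    · have hne := pvU_ne c hc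
      have e : pvA1 (c :: t) = PySem.Chars.upperChar c :: pvA0 t := by simp [pvA1, hc]
      rw [e, List.dropWhile_cons_of_neg (pvP_neg _ hne)]
    · have e : pvA1 (c :: t) = pvA1 t := by simp [pvA1, hc]
      rw [e, ih]

theorem pvLstrip_a0 (s : List Char) :
    List.dropWhile (fun c => (['_'] : List Char).contains c) (pvA0 s) = pvA1 s := by
  induction s with
  | nil => simp [pvA0, pvA1]
  | cons c t ih =>
    by_cases hc : PySem.Chars.isalnum c = true
    · have hne := pvU_ne c hc
      have e : pvA0 (c :: t) = PySem.Chars.upperChar c :: pvA0 t := by simp [pvA0, hc]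
      have e1 : pvA1 (c :: t) = PySem.Chars.upperChar c :: pvA0 t := by simp [pvA1, hc]
      rw [e, e1, List.dropWhile_cons_of_neg (pvP_neg _ hne)]
    · have e : pvA0 (c :: t) = '_' :: pvA1 t := by simp [pvA0, hc]
      have e1 : pvA1 (c :: t) = pvA1 t := by simp [pvA1, hc]
      rw [e, e1, List.dropWhile_cons_of_pos pvP_pos, pvLstrip_a1]

-- rstrip('_') as reverse∘dropWhile∘reverse, step lemmas
theorem pvRstrip_cons_ne (c : Char) (xs : List Char) (h : c ≠ '_') :
    (List.dropWhile (fun c => (['_'] : List Char).contains c) (c :: xs).reverse).reverse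
      = c :: (List.dropWhile (fun c => (['_'] : List Char).contains c) xs.reverse).reverse := by
  rw [List.reverse_cons, List.dropWhile_append]
  by_cases he : (List.dropWhile (fun c => (['_'] : List Char).contains c) xs.reverse).isEmpty = true
  · rw [if_pos he]
    rw [List.isEmpty_iff] at he
    rw [he, List.dropWhile_cons_of_neg (pvP_neg _ h)]
    simp
  · rw [if_neg he]
    simp

theorem pvRstrip_cons_us (xs : List Char) :
    (List.dropWhile (fun c => (['_'] : List Char).contains c) ('_' :: xs).reverse).reverse
      = if (List.dropWhile (fun c => (['_'] : List Char).contains c) xs.reverse).reverse = []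
        then []
        else '_' :: (List.dropWhile (fun c => (['_'] : List Char).contains c) xs.reverse).reverse := by
  rw [List.reverse_cons, List.dropWhile_append]
  by_cases he : (List.dropWhile (fun c => (['_'] : List Char).contains c) xs.reverse).isEmpty = true
  · rw [if_pos he]
    rw [List.isEmpty_iff] at he
    rw [he]
    rw [List.dropWhile_cons_of_pos pvP_pos]
    simp [he]
  · rw [if_neg he]
    rw [List.isEmpty_iff] at he
    have hne : (List.dropWhile (fun c => (['_'] : List Char).contains c) xs.reverse).reverse ≠ [] := by
      simpa using he
    rw [List.reverse_append, if_neg hne]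
    simp

theorem pvW2_eq (s : List Char) :
    pvW2 s = if pvW0 s = [] then [] else '_' :: pvW0 s := by
  induction s with
  | nil => simp [pvW0, pvW2]
  | cons c t ih =>
    by_cases hc : PySem.Chars.isalnum c = true <;> simp [pvW0, pvW2, hc, ih]

theorem pvRstrip_a (s : List Char) :
    (List.dropWhile (fun c => (['_'] : List Char).contains c) (pvA1 s).reverse).reverse = pvW0 s ∧
    (List.dropWhile (fun c => (['_'] : List Char).contains c) (pvA0 s).reverse).reverse = pvW1 s := by
  induction s with
  | nil => simp [pvA0, pvA1, pvW0, pvW1]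
  | cons c t ih =>
    obtain ⟨ih1, ih0⟩ := ih
    by_cases hc : PySem.Chars.isalnum c = true
    · have hne := pvU_ne c hc
      constructor
      · simp only [pvA1, hc, if_true, pvW0]
        rw [pvRstrip_cons_ne _ _ hne, ih0]
      · simp only [pvA0, hc, if_true, pvW1]
        rw [pvRstrip_cons_ne _ _ hne, ih0]
    · constructor
      · have e : pvA1 (c :: t) = pvA1 t := by simp [pvA1, hc]
        have e' : pvW0 (c :: t) = pvW0 t := by simp [pvW0, hc]
        rw [e, e', ih1]
      · have e : pvA0 (c :: t) = '_' :: pvA1 t := by simp [pvA0, hc]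
        have e' : pvW1 (c :: t) = pvW2 t := by simp [pvW1, hc]
        rw [e, e', pvRstrip_cons_us, ih1, pvW2_eq]

-- B-side: the fold invariant
theorem pvJ_nil : List.intercalate ['_'] ([] : List (List Char)) = [] := by
  simp [List.intercalate]

theorem pvJ_cons_cons (a b : List Char) (l : List (List Char)) :
    List.intercalate ['_'] (a :: b :: l) = a ++ '_' :: List.intercalate ['_'] (b :: l) := by
  simp [List.intercalate, List.intersperse]

theorem pvJ_append_singleton (ws : List (List Char)) (w : List Char) :
    List.intercalate ['_'] (ws ++ [w]) =
      (if ws = [] then [] else List.intercalate ['_'] ws ++ ['_']) ++ w := by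
  induction ws with
  | nil => simp [List.intercalate]
  | cons a ws ih =>
    cases ws with
    | nil => simp [pvJ_cons_cons, List.intercalate]
    | cons b ws' =>
      simp only [List.cons_append] at ih ⊢
      rw [pvJ_cons_cons, ih, pvJ_cons_cons]
      simp

theorem pvBinv (s : List Char) : ∀ (ws : List (List Char)) (cur : List Char),
    (let st := s.foldl pvStep (ws, cur)
     List.intercalate ['_'] (if st.2 ≠ [] then st.1 ++ [st.2] else st.1))
    = List.intercalate ['_'] ws ++
      (if cur = [] then (if ws = [] then pvW0 s else pvW2 s)
       else (if ws = [] then [] else ['_']) ++ cur ++ pvW1 s) := by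
  induction s with
  | nil =>
    intro ws cur
    by_cases hcur : cur = []
    · subst hcur; simp [pvW0, pvW2]
    · simp only [List.foldl_nil, hcur, if_pos, ne_eq, not_false_iff, pvW1]
      rw [pvJ_append_singleton]
      by_cases hws : ws = [] <;> simp [hws, hcur, pvJ_nil]
  | cons c t ih =>
    intro ws cur
    by_cases hc : PySem.Chars.isalnum c = true
    · have hstep : pvStep (ws, cur) c = (ws, cur ++ [PySem.Chars.upperChar c]) := by
        simp [pvStep, hc]
      simp only [List.foldl_cons, hstep, ih]
      by_cases hcur : cur = [] <;> by_cases hws : ws = [] <;>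
        simp [hcur, hws, pvW0, pvW1, pvW2, hc]
    · by_cases hcur : cur = []
      · have hstep : pvStep (ws, cur) c = (ws, cur) := by
          simp [pvStep, hc, hcur]
        simp only [List.foldl_cons, hstep, ih]
        simp [hcur, pvW0, pvW2, hc]
      · have hstep : pvStep (ws, cur) c = (ws ++ [cur], []) := by
          simp [pvStep, hc, hcur]
        simp only [List.foldl_cons, hstep, ih]
        have : (ws ++ [cur]) ≠ [] := by simp
        simp only [this, if_neg, hcur]
        rw [pvJ_append_singleton]
        by_cases hws : ws = [] <;> simp [hws, hcur, pvW1, hc, pvJ_nil]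

-- ===== VERDICT (by name: the statement is the Claim_ definition above) =====
theorem slug_to_macro_spec : Claim_equal_slug_to_macro := by
  intro name _dom
  unfold Spec_slug_to_macro slug_to_macro slug_to_macro_alt
  simp only []
  rw [PySem.List.foldl_append_singleton_eq_map]
  rw [List.nil_append, PySem.Chars.join_nil_singletons]
  rw [pvWhile_eq_sq, (pvSq_map name.toList).1]
  rw [PySem.Chars.stripChars]
  rw [pvLstrip_a0, (pvRstrip_a name.toList).1]
  have hb := pvBinv name.toList [] []
  simp only [PySem.Chars.join]
  rw [hb]
  simp [pvJ_nil]
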